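-- pv_equiv track=rewrite | github.com/H0R4T1U/LabRez | string_palindrom.py | palindrom_lung
-- ===== SOURCE A (Python) =====
-- def palindrom_lung(lista):
--     a = []
--     b = []
--     c = ""
--     for i in lista:
--         for j in range(len(i)):
--             a.append(i[j])
--         for j in range(len(i)-1,-1,-1):
--             b.append(i[j])
--         if a == b :
--             if len(i) > len(c):
--                 c = i
--     return c
-- ===== SOURCE B (Python) =====
-- def palindrom_lung(lista):
--     # Phase 1: maximal leading run of palindromic words.
--     prefix = []
--     for w in lista:
--         if w != w[::-1]:
--             break
--         prefix.append(w)
--     # Phase 2: longest of those (first one on ties), '' if none.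
--     return max(prefix, key=len, default="")
-- ===== Notes on version B (the rewrite author's own statement) =====
-- stated objective: simpler
-- what changed: Replaces A's single interleaved loop, which keeps ever-growing forward and word-reversed character accumulators and compares them as an implicit all-palindromes-so-far gate, with a two-stage pipeline: take the leading run of palindromic words (each checked locally via w == w[::-1]), then pick the longest with max(key=len, default='').
import Mathlib
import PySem

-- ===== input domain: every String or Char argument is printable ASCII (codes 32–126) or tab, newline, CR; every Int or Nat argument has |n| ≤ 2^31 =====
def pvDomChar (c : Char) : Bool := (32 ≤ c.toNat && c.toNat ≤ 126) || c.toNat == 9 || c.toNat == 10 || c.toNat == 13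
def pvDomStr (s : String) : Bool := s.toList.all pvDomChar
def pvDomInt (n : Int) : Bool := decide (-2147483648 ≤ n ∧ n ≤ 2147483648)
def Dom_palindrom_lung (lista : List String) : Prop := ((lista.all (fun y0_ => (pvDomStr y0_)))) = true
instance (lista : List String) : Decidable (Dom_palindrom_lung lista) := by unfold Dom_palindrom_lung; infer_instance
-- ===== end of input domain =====

-- B replaces A's interleaved loop (growing forward/word-reversed char accumulators compared
-- each step) with a two-stage pipeline: leading palindromic run, then longest by max(key=len).

-- ===== PORT A =====
-- one iteration of A's 'for i in lista' body over the state (a, b, c)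
def pvStepA (st : List Char × List Char × String) (i : String) : List Char × List Char × String :=
  let a := (PySem.List.pyRange 0 (PySem.Str.len i : Int) 1).foldl
             (fun acc j => acc ++ [PySem.List.pyGetD i.toList j ' ']) st.1
  let b := (PySem.List.pyRange ((PySem.Str.len i : Int) - 1) (-1) (-1)).foldl
             (fun acc j => acc ++ [PySem.List.pyGetD i.toList j ' ']) st.2.1
  if a = b then
    if PySem.Str.len i > PySem.Str.len st.2.2 then (a, b, i) else (a, b, st.2.2)
  else (a, b, st.2.2)

def palindrom_lung (lista : List String) : String :=
  (lista.foldl pvStepA ([], [], "")).2.2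

-- ===== PORT B =====
-- 'for w in lista: if w != w[::-1]: break; prefix.append(w)'
def pvPalPrefix : List String → List String
  | [] => []
  | w :: ws => if w ≠ (PySem.Str.slice? w none none (-1)).getD w then [] else w :: pvPalPrefix ws

def palindrom_lung_alt (lista : List String) : String :=
  PySem.List.maxD (pvPalPrefix lista) PySem.Str.len ""

-- ===== PRECONDITION & SPEC =====
def Spec_palindrom_lung (lista : List String) (out : String) : Prop := out = palindrom_lung_alt lista
instance (lista : List String) (out : String) : Decidable (Spec_palindrom_lung lista out) := by unfold Spec_palindrom_lung; infer_instance

-- ===== CLAIM (what is proved, stated in full; the proofs are below) =====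
def Claim_equal_palindrom_lung : Prop := ∀ (lista : List String), Dom_palindrom_lung lista → Spec_palindrom_lung lista (palindrom_lung lista)

-- ===== LEMMAS AND PROOFS =====

-- A's step, simplified: append the word's chars to a, its reversed chars to b
theorem pvStepA_eq (st : List Char × List Char × String) (i : String) :
    pvStepA st i =
      (st.1 ++ i.toList, st.2.1 ++ i.toList.reverse,
        if st.1 ++ i.toList = st.2.1 ++ i.toList.reverse then
          (if PySem.Str.len i > PySem.Str.len st.2.2 then i else st.2.2)
        else st.2.2) := by
  unfold pvStepA
  have hlen : (PySem.Str.len i : Int) = ((i.toList.length : Int)) := by simp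
  have hfwd : (PySem.List.pyRange 0 (PySem.Str.len i : Int) 1).foldl
      (fun acc j => acc ++ [PySem.List.pyGetD i.toList j ' ']) st.1 = st.1 ++ i.toList := by
    rw [hlen, PySem.List.foldl_pyRange_zero_pyGetD' i.toList ' ' (fun acc c => acc ++ [c]) st.1,
        PySem.List.foldl_append_singleton_eq_self]
  have hbwd : (PySem.List.pyRange ((PySem.Str.len i : Int) - 1) (-1) (-1)).foldl
      (fun acc j => acc ++ [PySem.List.pyGetD i.toList j ' ']) st.2.1 = st.2.1 ++ i.toList.reverse := by
    rw [PySem.List.pyRange_neg_one_eq_reverse]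
    have h1 : ((-1 : Int) + 1) = 0 := by norm_num
    have h2 : ((PySem.Str.len i : Int) - 1 + 1) = ((i.toList.length : Int)) := by
      rw [hlen]; ring
    rw [h1, h2, PySem.List.foldl_append_singleton_eq_map, List.map_reverse,
        PySem.List.map_pyGetD_pyRange_zero']
  simp only [hfwd, hbwd]
  split_ifs <;> rfl

-- once a ≠ b (with equal lengths), the condition never fires again and c is frozen
theorem pvLoop_mismatch : ∀ (l : List String) (a b : List Char) (c : String),
    a.length = b.length → a ≠ b → (l.foldl pvStepA (a, b, c)).2.2 = c := by
  intro l
  induction l with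
  | nil => intro a b c _ _; rfl
  | cons w t ih =>
    intro a b c hlen hne
    have hne' : a ++ w.toList ≠ b ++ w.toList.reverse := by
      intro h
      apply hne
      have h1 := congrArg (List.take a.length) h
      rw [List.take_left] at h1
      rw [hlen, List.take_left] at h1
      exact h1
    simp only [List.foldl_cons, pvStepA_eq, if_neg hne']
    exact ih _ _ _ (by simp [hlen]) hne'

-- the if-condition of pvPalPrefix is the palindrome test on the char list
theorem pvPalPrefix_cons (w : String) (ws : List String) :
    pvPalPrefix (w :: ws) =
      if w.toList = w.toList.reverse then w :: pvPalPrefix ws else [] := by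
  have hsl : (PySem.Str.slice? w none none (-1)).getD w = String.ofList w.toList.reverse := by
    rw [PySem.Str.slice?_none_none_neg_one]; rfl
  have hiff : (w ≠ String.ofList w.toList.reverse) ↔ ¬ (w.toList = w.toList.reverse) := by
    constructor
    · intro hne heq
      exact hne (by rw [← heq, String.ofList_toList])
    · intro hne heq
      apply hne
      have := congrArg String.toList heq
      simpa using this
  show (if w ≠ (PySem.Str.slice? w none none (-1)).getD w then [] else w :: pvPalPrefix ws) = _
  rw [hsl]
  by_cases h : w.toList = w.toList.reverse
  · rw [if_neg (by rw [hiff]; exact fun hh => hh h), if_pos h]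
  · rw [if_pos (hiff.mpr h), if_neg h]

-- while a = b, A's loop computes the running longest over the palindromic prefix
theorem pvLoop_pal : ∀ (l : List String) (p : List Char) (c : String),
    (l.foldl pvStepA (p, p, c)).2.2 =
      (pvPalPrefix l).foldl
        (fun c w => if PySem.Str.len w > PySem.Str.len c then w else c) c := by
  intro l
  induction l with
  | nil => intro p c; rfl
  | cons w t ih =>
    intro p c
    rw [pvPalPrefix_cons]
    by_cases hpal : w.toList = w.toList.reverse
    · have heq : p ++ w.toList = p ++ w.toList.reverse := by rw [← hpal]
      simp only [List.foldl_cons, pvStepA_eq, if_pos heq, if_pos hpal]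
      rw [show (p ++ w.toList.reverse) = (p ++ w.toList) by rw [← hpal]]
      exact ih (p ++ w.toList) _
    · have hne : p ++ w.toList ≠ p ++ w.toList.reverse := by
        intro h; exact hpal (List.append_cancel_left h)
      simp only [List.foldl_cons, pvStepA_eq, if_neg hne, if_neg hpal]
      exact pvLoop_mismatch t _ _ c (by simp) hne

-- max(c :: t, key=len) is the strict-greater running fold seeded with c
theorem pvMaxGo : ∀ (t : List String) (c : String),
    PySem.List.max? (c :: t) PySem.Str.len =
      some (t.foldl (fun c w => if PySem.Str.len w > PySem.Str.len c then w else c) c) := by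
  intro t
  induction t with
  | nil => intro c; rfl
  | cons w t ih =>
    intro c
    have h1 : PySem.List.max? (c :: w :: t) PySem.Str.len =
        PySem.List.max? ((if PySem.Str.len c < PySem.Str.len w then w else c) :: t) PySem.Str.len := by
      simp only [PySem.List.max?, List.foldl_cons]
      split_ifs <;> rfl
    rw [h1, ih]
    rfl

theorem pvMaxD_eq (ws : List String) :
    PySem.List.maxD ws PySem.Str.len "" =
      ws.foldl (fun c w => if PySem.Str.len w > PySem.Str.len c then w else c) "" := by
  cases ws with
  | nil => rfl
  | cons w t =>
    simp only [PySem.List.maxD]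
    rw [pvMaxGo, Option.getD_some]
    simp only [List.foldl_cons]
    by_cases h : PySem.Str.len w > PySem.Str.len ""
    · rw [if_pos h]
    · rw [if_neg h]
      have hw : w = "" := by
        have h0 : w.toList = [] := by
          apply List.length_eq_zero_iff.mp
          have hl := PySem.Str.len_eq w
          simp only [hl, PySem.Str.len_eq, show ("" : String).toList = [] from rfl,
            List.length_nil] at h
          omega
        have := congrArg String.ofList h0
        simpa using this
      rw [hw]

-- ===== VERDICT (by name: the statement is the Claim_ definition above) =====
theorem palindrom_lung_spec : Claim_equal_palindrom_lung := by
  intro lista _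
  show palindrom_lung lista = palindrom_lung_alt lista
  rw [palindrom_lung, palindrom_lung_alt, pvLoop_pal lista [] "", pvMaxD_eq]
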